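-- pv_equiv track=rewrite | github.com/anviks/advent-of-code | 2023/day_12/solution.py | is_valid_permutation_2
-- ===== SOURCE A (Python) =====
-- def is_valid_permutation_2(springs: tuple[str], counts: tuple[int]) -> bool:
--     expected_length = len(counts)
--     prev_spr_damaged = False
--     comb_counts = []
--     last_cc_index = -1
--
--     for spr in springs:
--         if spr == '#':
--             if prev_spr_damaged:
--                 comb_counts[-1] += 1
--
--                 # Saves another 0.1 seconds
--                 if comb_counts[last_cc_index] > counts[last_cc_index]:
--                     return False
--             else:
--                 comb_counts.append(1)
--                 last_cc_index += 1
--                 prev_spr_damaged = True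
--
--                 # Means that comb_counts exceeded expected length by 1.
--                 if last_cc_index == expected_length:
--                     return False
--         else:
--             prev_spr_damaged = False
--
--             # Early exit if the combination is invalid, halving the time taken for part 1 (10s -> 5.5s)
--             if last_cc_index != -1 and comb_counts[last_cc_index] != counts[last_cc_index]:
--                 return False
--
--     return tuple(comb_counts) == counts
-- ===== SOURCE B (Python) =====
-- def is_valid_permutation_2(springs: tuple, counts: tuple) -> bool:
--     # Two-pointer block tokenizer: skip separators, measure each maximal
--     # '#' block with an inner scan, then compare all block lengths at once.
--     n = len(springs)
--     runs = []
--     i = 0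
--     while i < n:
--         if springs[i] == '#':
--             j = i + 1
--             while j < n and springs[j] == '#':
--                 j += 1
--             runs.append(j - i)
--             i = j
--         else:
--             i += 1
--     return tuple(runs) == counts
-- ===== Notes on version B (the rewrite author's own statement) =====
-- stated objective: alternative
-- what changed: B replaces A's character-by-character state machine (prev flag, last index, in-place last-element increment, three interleaved early exits) with a two-pointer block tokenizer: an outer pointer skips separators, an inner scan measures each maximal '#' block in one go, and the collected block lengths are compared to counts in a single final equality.
import Mathlib
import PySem

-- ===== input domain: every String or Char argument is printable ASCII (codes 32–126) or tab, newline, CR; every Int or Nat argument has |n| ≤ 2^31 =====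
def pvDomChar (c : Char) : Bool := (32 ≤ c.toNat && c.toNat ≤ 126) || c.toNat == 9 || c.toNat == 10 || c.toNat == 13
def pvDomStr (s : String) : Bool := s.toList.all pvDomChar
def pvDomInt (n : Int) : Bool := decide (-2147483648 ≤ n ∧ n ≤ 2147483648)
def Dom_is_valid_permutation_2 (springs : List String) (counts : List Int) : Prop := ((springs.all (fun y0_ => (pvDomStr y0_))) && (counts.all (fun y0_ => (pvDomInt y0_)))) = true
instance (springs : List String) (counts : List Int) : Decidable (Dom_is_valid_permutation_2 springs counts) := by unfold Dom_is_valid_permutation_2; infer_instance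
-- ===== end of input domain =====

-- B replaces A's char-by-char state machine (prev flag, last index, in-place increment, three
-- early exits) by a two-pointer block tokenizer: skip separators, measure each maximal '#'
-- block with an inner scan, compare the block lengths to counts once (objective: alternative).

-- ===== PORT A =====
-- loop body of A; state = some (comb_counts, prev_spr_damaged, last_cc_index), none = early `return False`
def stepA (counts : List Int) (st : Option (List Int × Bool × Int)) (spr : String) : Option (List Int × Bool × Int) :=
  match st with
  | none => none
  | some (cc, prev, lcc) =>
    if spr == "#" then
      if prev then
        -- comb_counts[-1] += 1  (prev = true ⇒ cc ≠ [] and 0 ≤ lcc < len, so all three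
        -- indexings are in range and the `.getD 0` defaults are never taken)
        let cc := cc.dropLast ++ [((PySem.List.pyGet? cc (-1)).getD 0) + 1]
        if ((PySem.List.pyGet? cc lcc).getD 0) > ((PySem.List.pyGet? counts lcc).getD 0) then none
        else some (cc, prev, lcc)
      else
        let cc := cc ++ [(1 : Int)]
        let lcc := lcc + 1
        if lcc == (counts.length : Int) then none
        else some (cc, true, lcc)
    else
      if lcc != -1 && ((PySem.List.pyGet? cc lcc).getD 0) != ((PySem.List.pyGet? counts lcc).getD 0) then none
      else some (cc, false, lcc)

def is_valid_permutation_2 (springs : List String) (counts : List Int) : Bool :=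
  match springs.foldl (stepA counts) (some ([], false, -1)) with
  | none => false
  | some (cc, _, _) => cc == counts

-- ===== PORT B =====
-- inner scan: `while j < n and springs[j] == '#': j += 1`
def bInner (springs : List String) (j : Nat) : Nat :=
  if h : j < springs.length then
    if springs[j] == "#" then bInner springs (j + 1) else j
  else j
termination_by springs.length - j

-- `j ≤ bInner springs j` (used only to justify termination of the outer loop)
theorem bInner_le (springs : List String) (j : Nat) : j ≤ bInner springs j := by
  unfold bInner
  split
  · split
    · exact Nat.le_trans (Nat.le_succ j) (bInner_le springs (j + 1))
    · exact Nat.le_refl j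
  · exact Nat.le_refl j
termination_by springs.length - j

-- outer loop: skip separators, tokenize a block at each '#'
def bOuter (springs : List String) (runs : List Int) (i : Nat) : List Int :=
  if h : i < springs.length then
    if springs[i] == "#" then
      let j := bInner springs (i + 1)
      bOuter springs (runs ++ [(j : Int) - (i : Int)]) j
    else bOuter springs runs (i + 1)
  else runs
termination_by springs.length - i
decreasing_by
  · have := bInner_le springs (i + 1); omega
  · omega

def is_valid_permutation_2_alt (springs : List String) (counts : List Int) : Bool :=
  bOuter springs [] 0 == counts

-- ===== PRECONDITION & SPEC =====
def Spec_is_valid_permutation_2 (springs : List String) (counts : List Int) (out : Bool) : Prop := out = is_valid_permutation_2_alt springs counts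
instance (springs : List String) (counts : List Int) (out : Bool) : Decidable (Spec_is_valid_permutation_2 springs counts out) := by unfold Spec_is_valid_permutation_2; infer_instance

-- ===== CLAIM (what is proved, stated in full; the proofs are below) =====
def Claim_equal_is_valid_permutation_2 : Prop := ∀ (springs : List String) (counts : List Int), Dom_is_valid_permutation_2 springs counts → Spec_is_valid_permutation_2 springs counts (is_valid_permutation_2 springs counts)

-- ===== LEMMAS AND PROOFS =====

-- final answer from A's loop state
def finA (counts : List Int) (st : Option (List Int × Bool × Int)) : Bool :=
  match st with
  | none => false
  | some (cc, _, _) => cc == counts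

-- reference run-length state machine used only inside the proof to couple the two ports:
-- state = (closed runs, open-run length)
def stepB (st : List Int × Int) (spr : String) : List Int × Int :=
  if spr == "#" then (st.1, st.2 + 1)
  else if st.2 != 0 then (st.1 ++ [st.2], 0)
  else st

def closeSt (st : List Int × Int) : List Int :=
  if st.2 != 0 then st.1 ++ [st.2] else st.1

-- final answer from the reference state
def finB (counts : List Int) (st : List Int × Int) : Bool :=
  closeSt st == counts

-- length of the leading '#' block
def countHash (l : List String) : Nat := (l.takeWhile (fun s => s == "#")).length

-- a reference-state from which the final comparison can no longer equal counts
def Bad (counts runs : List Int) (n : Int) : Prop :=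
  (¬ runs <+: counts) ∨ (1 ≤ n ∧ (counts.length ≤ runs.length ∨ counts.getD runs.length 0 < n))

-- coupling invariant between A's loop state and the reference state
def InvAB (counts cc : List Int) (prev : Bool) (lcc : Int) (runs : List Int) (n : Int) : Prop :=
  runs = counts.take runs.length ∧
  (if prev then cc = runs ++ [n] ∧ 1 ≤ n ∧ lcc = (runs.length : Int) ∧ runs.length < counts.length
   else cc = runs ∧ n = 0 ∧ lcc = (runs.length : Int) - 1 ∧ runs.length ≤ counts.length)

lemma foldA_none (counts : List Int) (l : List String) :
    l.foldl (stepA counts) none = none := by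
  induction l with
  | nil => rfl
  | cons x xs ih => simpa [stepA] using ih

lemma concat_ne_of_not_prefix {runs counts : List Int} (h : ¬ runs <+: counts) (x : Int) :
    (runs ++ [x] == counts) = false := by
  apply beq_eq_false_iff_ne.mpr
  intro he
  exact h ⟨[x], he⟩

lemma bad_fin {counts runs : List Int} {n : Int} (h : Bad counts runs n) :
    finB counts (runs, n) = false := by
  rcases h with h | ⟨h1, h2⟩
  · by_cases hn : n = 0
    · simp only [finB, closeSt, hn]
      simp only [bne_self_eq_false]
      exact beq_eq_false_iff_ne.mpr (fun he => h (he ▸ List.prefix_refl _))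
    · simp only [finB, closeSt]
      rw [if_pos (by simpa using hn)]
      exact concat_ne_of_not_prefix h n
  · have hn : n ≠ 0 := by omega
    simp only [finB, closeSt]
    rw [if_pos (by simpa using hn)]
    apply beq_eq_false_iff_ne.mpr
    intro he
    rcases h2 with h2 | h2
    · have := congrArg List.length he
      simp at this; omega
    · have hlt : runs.length < counts.length := by
        have := congrArg List.length he
        simp at this; omega
      subst he
      rw [List.getD_eq_getElem _ 0 hlt] at h2
      simp at h2

lemma bad_step {counts : List Int} {runs : List Int} {n : Int} (spr : String)
    (h : Bad counts runs n) :
    Bad counts (stepB (runs, n) spr).1 (stepB (runs, n) spr).2 := by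
  unfold stepB
  by_cases hs : spr == "#"
  · rw [if_pos hs]
    show Bad counts runs (n + 1)
    rcases h with h | ⟨h1, h2⟩
    · exact Or.inl h
    · refine Or.inr ⟨by omega, ?_⟩
      rcases h2 with h2 | h2
      · exact Or.inl h2
      · exact Or.inr (by omega)
  · rw [if_neg hs]
    by_cases hn : n = 0
    · rw [if_neg (by simp [hn])]
      exact h
    · rw [if_pos (by simpa using hn)]
      show Bad counts (runs ++ [n]) 0
      refine Or.inl ?_
      intro hp
      rcases h with h | ⟨h1, h2⟩
      · exact h (List.IsPrefix.trans ⟨[n], rfl⟩ hp)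
      · have hlen := hp.length_le
        simp at hlen
        rcases h2 with h2 | h2
        · omega
        · have hlt : runs.length < counts.length := by omega
          rcases hp with ⟨t, ht⟩
          subst ht
          rw [List.getD_eq_getElem _ 0 hlt] at h2
          simp at h2

lemma bad_fold {counts : List Int} (l : List String) :
    ∀ (runs : List Int) (n : Int), Bad counts runs n →
      finB counts (l.foldl stepB (runs, n)) = false := by
  induction l with
  | nil => intro runs n h; exact bad_fin h
  | cons x xs ih =>
    intro runs n h
    have := bad_step (counts := counts) x h
    simpa using ih (stepB (runs, n) x).1 (stepB (runs, n) x).2 (by simpa using this)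

lemma take_eq_getElem {counts runs : List Int} (h : runs = counts.take runs.length)
    {i : Nat} (hi : i < runs.length) (hic : i < counts.length) : runs[i] = counts[i] := by
  have h2 : runs[i]? = counts[i]? := by
    rw [h]
    simp [hi]
  rw [List.getElem?_eq_getElem hi, List.getElem?_eq_getElem hic] at h2
  exact Option.some_injective _ h2

lemma main_lemma (counts : List Int) (l : List String) :
    ∀ (cc : List Int) (prev : Bool) (lcc : Int) (runs : List Int) (n : Int),
      InvAB counts cc prev lcc runs n →
      finA counts (l.foldl (stepA counts) (some (cc, prev, lcc)))
        = finB counts (l.foldl stepB (runs, n)) := by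
  induction l with
  | nil =>
    intro cc prev lcc runs n hInv
    obtain ⟨htake, hrest⟩ := hInv
    cases prev with
    | true =>
      rw [if_pos rfl] at hrest
      obtain ⟨hcc, hn, _, _⟩ := hrest
      subst hcc
      simp only [List.foldl_nil, finA, finB, closeSt]
      rw [if_pos (show (n != 0) = true by simp; omega)]
    | false =>
      rw [if_neg (by simp)] at hrest
      obtain ⟨hcc, hn, _, _⟩ := hrest
      subst hn
      simp only [List.foldl_nil, finA, finB, closeSt]
      rw [if_neg (by simp), hcc]
  | cons spr l ih =>
    intro cc prev lcc runs n hInv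
    obtain ⟨htake, hrest⟩ := hInv
    simp only [List.foldl_cons]
    by_cases hs : (spr == "#") = true
    · cases prev with
      | true =>
        rw [if_pos rfl] at hrest
        obtain ⟨hcc, hn, hlcc, hlen⟩ := hrest
        subst hcc hlcc
        have hB : stepB (runs, n) spr = (runs, n + 1) := by simp [stepB, hs]
        have hget1 : PySem.List.pyGet? (runs ++ [n]) (-1) = some n := by
          rw [PySem.List.pyGet?_neg_one]; simp
        have hdrop : (runs ++ [n]).dropLast = runs := by simp
        have hget2 : PySem.List.pyGet? (runs ++ [n + 1]) ((runs.length : Int)) = some (n + 1) :=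
          PySem.List.pyGet?_append_length runs [] (n + 1)
        have hget3 : PySem.List.pyGet? counts ((runs.length : Int)) = some counts[runs.length] := by
          rw [PySem.List.pyGet?_natCast]; exact List.getElem?_eq_getElem hlen
        have hA : stepA counts (some (runs ++ [n], true, (runs.length : Int))) spr
            = if counts[runs.length] < n + 1 then none
              else some (runs ++ [n + 1], true, (runs.length : Int)) := by
          simp [stepA, hs, hget1, hdrop, hget3]
        rw [hA, hB]
        by_cases hgt : counts[runs.length] < n + 1
        · rw [if_pos hgt, foldA_none]
          exact (bad_fold l runs (n + 1)
            (Or.inr ⟨by omega, Or.inr (by rw [List.getD_eq_getElem _ 0 hlen]; omega)⟩)).symm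
        · rw [if_neg hgt]
          exact ih _ true _ runs (n + 1)
            ⟨htake, by rw [if_pos rfl]; exact ⟨rfl, by omega, rfl, hlen⟩⟩
      | false =>
        rw [if_neg (by simp)] at hrest
        obtain ⟨hcc, hn, hlcc, hlen⟩ := hrest
        subst hn hlcc
        rw [hcc]
        have hB : stepB (runs, 0) spr = (runs, 0 + 1) := by simp [stepB, hs]
        have hA : stepA counts (some (runs, false, (runs.length : Int) - 1)) spr
            = if ((runs.length : Int) - 1 + 1) == (counts.length : Int) then none
              else some (runs ++ [1], true, (runs.length : Int) - 1 + 1) := by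
          simp [stepA, hs]
        rw [hA, hB]
        by_cases heq : runs.length = counts.length
        · rw [if_pos (by simp; omega), foldA_none]
          exact (bad_fold l runs (0 + 1) (Or.inr ⟨by omega, Or.inl (by omega)⟩)).symm
        · have hlt : runs.length < counts.length := by omega
          rw [if_neg (by simp; omega)]
          have hc : (runs.length : Int) - 1 + 1 = (runs.length : Int) := by ring
          rw [hc]
          exact ih _ true _ runs (0 + 1)
            ⟨htake, by rw [if_pos rfl]; exact ⟨rfl, by omega, rfl, hlt⟩⟩
    · cases prev with
      | true =>
        rw [if_pos rfl] at hrest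
        obtain ⟨hcc, hn, hlcc, hlen⟩ := hrest
        subst hcc hlcc
        have hB : stepB (runs, n) spr = (runs ++ [n], 0) := by
          simp [stepB, hs]; omega
        have hget2 : PySem.List.pyGet? (runs ++ [n]) ((runs.length : Int)) = some n :=
          PySem.List.pyGet?_append_length runs [] n
        have hget3 : PySem.List.pyGet? counts ((runs.length : Int)) = some counts[runs.length] := by
          rw [PySem.List.pyGet?_natCast]; exact List.getElem?_eq_getElem hlen
        by_cases hmis : n = counts[runs.length]
        · have hA : stepA counts (some (runs ++ [n], true, (runs.length : Int))) spr
              = some (runs ++ [n], false, (runs.length : Int)) := by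
            simp [stepA, hs, hget3, hmis]
          rw [hA, hB]
          have ht' : runs ++ [n] = counts.take (runs.length + 1) := by
            rw [List.take_add_one, ← htake, List.getElem?_eq_getElem hlen, hmis]; rfl
          refine ih _ false _ (runs ++ [n]) 0 ⟨by simpa using ht', ?_⟩
          rw [if_neg (by simp)]
          refine ⟨rfl, rfl, by simp, by simp; omega⟩
        · have hA : stepA counts (some (runs ++ [n], true, (runs.length : Int))) spr
              = none := by
            simp [stepA, hs, hget3, hmis]
          rw [hA, hB, foldA_none]
          refine (bad_fold l (runs ++ [n]) 0 (Or.inl ?_)).symm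
          rintro ⟨t, ht⟩
          subst ht
          simp at hmis
      | false =>
        rw [if_neg (by simp)] at hrest
        obtain ⟨hcc, hn, hlcc, hlen⟩ := hrest
        subst hn hlcc
        rw [hcc]
        have hB : stepB (runs, 0) spr = (runs, 0) := by simp [stepB, hs]
        rcases Nat.eq_zero_or_pos runs.length with h0 | hpos
        · have hA : stepA counts (some (runs, false, (runs.length : Int) - 1)) spr
              = some (runs, false, (runs.length : Int) - 1) := by
            simp [stepA, hs, h0]
          rw [hA, hB]
          exact ih _ false _ runs 0
            ⟨htake, by rw [if_neg (by simp)]; exact ⟨rfl, rfl, rfl, hlen⟩⟩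
        · have hil : runs.length - 1 < runs.length := by omega
          have hic : runs.length - 1 < counts.length := by omega
          have hcast : (runs.length : Int) - 1 = ((runs.length - 1 : Nat) : Int) := by omega
          have hget2 : PySem.List.pyGet? runs ((runs.length : Int) - 1)
              = some runs[runs.length - 1] := by
            rw [hcast, PySem.List.pyGet?_natCast]; exact List.getElem?_eq_getElem hil
          have hget3 : PySem.List.pyGet? counts ((runs.length : Int) - 1)
              = some counts[runs.length - 1] := by
            rw [hcast, PySem.List.pyGet?_natCast]; exact List.getElem?_eq_getElem hic
          have heqv : runs[runs.length - 1] = counts[runs.length - 1] :=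
            take_eq_getElem htake hil hic
          have hA : stepA counts (some (runs, false, (runs.length : Int) - 1)) spr
              = some (runs, false, (runs.length : Int) - 1) := by
            simp [stepA, hs, hget2, hget3, heqv]
          rw [hA, hB]
          exact ih _ false _ runs 0
            ⟨htake, by rw [if_neg (by simp)]; exact ⟨rfl, rfl, rfl, hlen⟩⟩

-- ---- bridge: the two-pointer scanner computes closeSt (foldl stepB ([],0)) ----

-- prefix invariance of the reference state machine
lemma stepB_shift (l : List String) :
    ∀ (pre rs : List Int) (n : Int),
      l.foldl stepB (pre ++ rs, n)
        = (pre ++ (l.foldl stepB (rs, n)).1, (l.foldl stepB (rs, n)).2) := by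
  induction l with
  | nil => intro pre rs n; rfl
  | cons s t ih =>
    intro pre rs n
    simp only [List.foldl_cons]
    by_cases hs : (s == "#") = true
    · have h1 : stepB (pre ++ rs, n) s = (pre ++ rs, n + 1) := by simp [stepB, hs]
      have h2 : stepB (rs, n) s = (rs, n + 1) := by simp [stepB, hs]
      rw [h1, h2]
      exact ih pre rs (n + 1)
    · by_cases hn : n = 0
      · have h1 : stepB (pre ++ rs, n) s = (pre ++ rs, n) := by simp [stepB, hs, hn]
        have h2 : stepB (rs, n) s = (rs, n) := by simp [stepB, hs, hn]
        rw [h1, h2]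
        exact ih pre rs n
      · have h1 : stepB (pre ++ rs, n) s = (pre ++ rs ++ [n], 0) := by
          simp [stepB, hs, hn]
        have h2 : stepB (rs, n) s = (rs ++ [n], 0) := by
          simp [stepB, hs, hn]
        rw [h1, h2, List.append_assoc]
        exact ih pre (rs ++ [n]) 0

lemma countHash_cons_hash (s : String) (t : List String) (hs : (s == "#") = true) :
    countHash (s :: t) = countHash t + 1 := by
  simp [countHash, List.takeWhile, hs]

lemma countHash_cons_sep (s : String) (t : List String) (hs : (s == "#") = false) :
    countHash (s :: t) = 0 := by
  simp [countHash, List.takeWhile, hs]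

-- closing an open run of length n ≥ 1: it absorbs the leading '#' block
lemma closeSt_open (t : List String) :
    ∀ (n : Int), 1 ≤ n →
      closeSt (t.foldl stepB ([], n))
        = (n + (countHash t : Int)) :: closeSt ((t.drop (countHash t)).foldl stepB ([], 0)) := by
  induction t with
  | nil =>
    intro n hn
    simp only [List.foldl_nil, List.drop_nil]
    have hch : countHash ([] : List String) = 0 := rfl
    rw [hch]
    simp only [closeSt]
    rw [if_pos (by simp; omega), if_neg (by simp)]
    simp
  | cons s t ih =>
    intro n hn
    simp only [List.foldl_cons]
    by_cases hs : (s == "#") = true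
    · have hB : stepB ([], n) s = ([], n + 1) := by simp [stepB, hs]
      rw [hB, countHash_cons_hash s t hs, ih (n + 1) (by omega)]
      have hd : List.drop (countHash t + 1) (s :: t) = List.drop (countHash t) t := by
        simp [List.drop_succ_cons]
      rw [hd]
      congr 1
      push_cast; ring
    · have hs' : (s == "#") = false := by simpa using hs
      have hB : stepB ([], n) s = ([n], 0) := by
        simp [stepB, hs']; omega
      rw [hB, countHash_cons_sep s t hs']
      have hshift := stepB_shift t [n] [] 0
      simp only [List.append_nil] at hshift
      rw [hshift]
      simp only [List.drop_zero, List.foldl_cons]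
      have hB0 : stepB ([], 0) s = ([], 0) := by simp [stepB, hs']
      rw [hB0]
      simp only [closeSt]
      by_cases hm : ((t.foldl stepB ([], 0)).2 != 0) = true
      · rw [if_pos hm, if_pos hm]
        simp
      · rw [if_neg hm, if_neg hm]
        simp

-- characterization of the inner scan
lemma bInner_eq (springs : List String) :
    ∀ (j : Nat), bInner springs j = j + countHash (springs.drop j) := by
  intro j
  induction hk : springs.length - j using Nat.strong_induction_on generalizing j with
  | _ k ihk =>
    unfold bInner
    by_cases h : j < springs.length
    · rw [dif_pos h]
      have hdrop : springs.drop j = springs[j] :: springs.drop (j + 1) :=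
        (List.drop_eq_getElem_cons h)
      by_cases hs : (springs[j] == "#") = true
      · rw [if_pos hs]
        have := ihk (springs.length - (j + 1)) (by omega) (j + 1) rfl
        rw [this, hdrop, countHash_cons_hash _ _ hs]
        omega
      · rw [if_neg hs, hdrop, countHash_cons_sep _ _ (by simpa using hs)]
        simp
    · rw [dif_neg h]
      have : springs.drop j = [] := List.drop_eq_nil_of_le (by omega)
      rw [this]
      simp [countHash]

-- characterization of the outer loop
lemma bOuter_eq (springs : List String) :
    ∀ (i : Nat) (runs : List Int),
      bOuter springs runs i = runs ++ closeSt ((springs.drop i).foldl stepB ([], 0)) := by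
  intro i
  induction hk : springs.length - i using Nat.strong_induction_on generalizing i with
  | _ k ihk =>
    intro runs
    unfold bOuter
    by_cases h : i < springs.length
    · rw [dif_pos h]
      have hdrop : springs.drop i = springs[i] :: springs.drop (i + 1) :=
        (List.drop_eq_getElem_cons h)
      by_cases hs : (springs[i] == "#") = true
      · rw [if_pos hs]
        set c := countHash (springs.drop (i + 1)) with hc
        have hj : bInner springs (i + 1) = i + 1 + c := bInner_eq springs (i + 1)
        rw [hj]
        show bOuter springs (runs ++ [((i + 1 + c : Nat) : Int) - (i : Int)]) (i + 1 + c)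
          = runs ++ closeSt ((springs.drop i).foldl stepB ([], 0))
        have hval : ((i + 1 + c : Nat) : Int) - (i : Int) = 1 + (c : Int) := by
          push_cast; ring
        rw [hval]
        have hrec := ihk (springs.length - (i + 1 + c)) (by omega) (i + 1 + c) rfl
          (runs ++ [1 + (c : Int)])
        rw [hrec, List.append_assoc]
        congr 1
        have hdrop2 : springs.drop (i + 1 + c) = (springs.drop (i + 1)).drop c := by
          rw [List.drop_drop]
        rw [hdrop2, hdrop]
        simp only [List.foldl_cons]
        have hB : stepB ([], 0) springs[i] = ([], 1) := by simp [stepB, hs]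
        rw [hB, closeSt_open (springs.drop (i + 1)) 1 (by omega), ← hc]
        simp
      · rw [if_neg hs]
        have hrec := ihk (springs.length - (i + 1)) (by omega) (i + 1) rfl runs
        rw [hrec, hdrop]
        simp only [List.foldl_cons]
        have hB : stepB ([], 0) springs[i] = ([], 0) := by
          simp [stepB, show (springs[i] == "#") = false by simpa using hs]
        rw [hB]
    · rw [dif_neg h]
      have : springs.drop i = [] := List.drop_eq_nil_of_le (by omega)
      rw [this]
      simp [closeSt]

lemma alt_eq_finB (springs : List String) (counts : List Int) :
    is_valid_permutation_2_alt springs counts = finB counts (springs.foldl stepB ([], 0)) := by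
  unfold is_valid_permutation_2_alt finB
  rw [bOuter_eq springs 0 []]
  simp

-- ===== VERDICT (by name: the statement is the Claim_ definition above) =====
theorem is_valid_permutation_2_spec : Claim_equal_is_valid_permutation_2 := by
  intro springs counts _
  show is_valid_permutation_2 springs counts = is_valid_permutation_2_alt springs counts
  have hA : is_valid_permutation_2 springs counts
      = finA counts (springs.foldl (stepA counts) (some ([], false, -1))) := rfl
  rw [hA, alt_eq_finB]
  exact main_lemma counts springs [] false (-1) [] 0 ⟨by simp, by simp⟩
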